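-- pv_equiv track=rewrite | github.com/MHCooke/aoc2023 | day 12/sol1.py | detect_groups
-- ===== SOURCE A (Python) =====
-- from typing import List
--
-- def detect_groups(springs: str) -> List[int]:
--     output = []
--     spring_counter = 0
--     for spring in springs:
--         if spring == '#':
--             spring_counter += 1
--         if spring == '.' and spring_counter > 0:
--             output.append(spring_counter)
--             spring_counter = 0
--     if spring_counter > 0:
--         output.append(spring_counter)
--     return output
-- ===== SOURCE B (Python) =====
-- def detect_groups(springs):
--     return [seg.count('#') for seg in springs.split('.') if seg.count('#') > 0]
-- ===== Notes on version B (the rewrite author's own statement) =====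
-- stated objective: simpler
-- what changed: Replaced the character-by-character counter loop with a split on the dot separator into segments, emitting each segment's hash-count when positive.
import Mathlib
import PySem

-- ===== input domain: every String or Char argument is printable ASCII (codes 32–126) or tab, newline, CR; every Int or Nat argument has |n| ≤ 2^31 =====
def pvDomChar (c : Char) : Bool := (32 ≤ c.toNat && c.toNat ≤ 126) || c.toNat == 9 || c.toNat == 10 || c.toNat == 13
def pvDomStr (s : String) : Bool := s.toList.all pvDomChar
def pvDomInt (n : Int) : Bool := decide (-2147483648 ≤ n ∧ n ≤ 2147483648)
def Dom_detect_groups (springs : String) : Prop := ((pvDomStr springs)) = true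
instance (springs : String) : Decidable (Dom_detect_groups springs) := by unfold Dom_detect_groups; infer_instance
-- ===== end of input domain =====

-- B replaces A's character-by-character counter loop by splitting on '.' and counting '#' per segment (objective: simpler).

-- ===== PORT A =====
-- loop body of A's for-loop, as a helper (same state: (output, spring_counter))
def stepA (st : List Int × Int) (spring : Char) : List Int × Int :=
  let st := if spring = '#' then (st.1, st.2 + 1) else st
  if spring = '.' ∧ st.2 > 0 then (st.1 ++ [st.2], 0) else st

def detect_groups (springs : String) : List Int :=
  let st := springs.toList.foldl stepA ([], 0)
  if st.2 > 0 then st.1 ++ [st.2] else st.1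

-- ===== PORT B =====
def detect_groups_alt (springs : String) : List Int :=
  match PySem.Str.split? springs "." with
  | none => []   -- unreachable: the separator "." is nonempty
  | some segs =>
    (segs.filter (fun seg => PySem.Str.count seg "#" > 0)).map
      (fun seg => (PySem.Str.count seg "#" : Int))

-- ===== PRECONDITION & SPEC =====
def Spec_detect_groups (springs : String) (out : List Int) : Prop := out = detect_groups_alt springs
instance (springs : String) (out : List Int) : Decidable (Spec_detect_groups springs out) := by unfold Spec_detect_groups; infer_instance

-- ===== CLAIM (what is proved, stated in full; the proofs are below) =====
def Claim_equal_detect_groups : Prop := ∀ (springs : String), Dom_detect_groups springs → Spec_detect_groups springs (detect_groups springs)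

-- ===== LEMMAS AND PROOFS =====

-- reference split of a char list at '.' (always nonempty)
def mySplit : List Char → List (List Char)
  | [] => [[]]
  | c :: t =>
    let r := mySplit t
    if c = '.' then [] :: r else (c :: r.headI) :: r.tail

lemma mySplit_ne_nil (l : List Char) : mySplit l ≠ [] := by
  cases l with
  | nil => simp [mySplit]
  | cons c t => simp only [mySplit]; split <;> simp

-- A's loop, characterized structurally
def gA : Int → List Char → List Int
  | k, [] => if k > 0 then [k] else []
  | k, c :: t =>
    if c = '.' then (if k > 0 then [k] else []) ++ gA 0 t
    else gA (if c = '#' then k + 1 else k) t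

lemma count_go_single (l : List Char) (acc : Nat) :
    PySem.Chars.count.go ['#'] l.length l acc = acc + l.count '#' := by
  induction l generalizing acc with
  | nil => simp [PySem.Chars.count.go]
  | cons c t ih =>
    by_cases hc : c = '#'
    · subst hc
      simp [PySem.Chars.count.go, List.isPrefixOf, ih]
      omega
    · simp [PySem.Chars.count.go, List.isPrefixOf, Ne.symm hc, ih]
      rw [List.count_cons]
      simp [hc]

lemma chars_count_single (l : List Char) : PySem.Chars.count l ['#'] = l.count '#' := by
  simpa [PySem.Chars.count] using count_go_single l 0

def consHead (p : List Char) (r : List (List Char)) : List (List Char) :=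
  (p ++ r.headI) :: r.tail

lemma splitOn_go_eq (l : List Char) : ∀ (fuel : Nat) (cur : List Char) (acc : List (List Char)),
    l.length < fuel →
    PySem.Chars.splitOn.go ['.'] fuel l cur acc = acc.reverse ++ consHead cur.reverse (mySplit l) := by
  induction l with
  | nil =>
    intro fuel cur acc h
    match fuel, h with
    | fuel + 1, _ => simp [PySem.Chars.splitOn.go, consHead, mySplit]
  | cons c t ih =>
    intro fuel cur acc h
    match fuel, h with
    | fuel + 1, h =>
      by_cases hc : c = '.'
      · subst hc
        rw [show PySem.Chars.splitOn.go ['.'] (fuel + 1) ('.' :: t) cur acc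
              = PySem.Chars.splitOn.go ['.'] fuel t [] (cur.reverse :: acc) by
            simp [PySem.Chars.splitOn.go, List.isPrefixOf]]
        rw [ih fuel [] (cur.reverse :: acc) (by simpa using h)]
        rcases hne : mySplit t with _ | ⟨s, r⟩
        · exact absurd hne (mySplit_ne_nil t)
        · simp [consHead, mySplit, hne]
      · rw [show PySem.Chars.splitOn.go ['.'] (fuel + 1) (c :: t) cur acc
              = PySem.Chars.splitOn.go ['.'] fuel t (c :: cur) acc by
            simp [PySem.Chars.splitOn.go, List.isPrefixOf, Ne.symm hc]]
        rw [ih fuel (c :: cur) acc (by simpa using h)]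
        rcases hne : mySplit t with _ | ⟨s, r⟩
        · exact absurd hne (mySplit_ne_nil t)
        · simp [consHead, mySplit, hc, hne]

lemma splitOn_eq_mySplit (l : List Char) : PySem.Chars.splitOn l ['.'] = mySplit l := by
  rw [PySem.Chars.splitOn, splitOn_go_eq l (l.length + 1) [] [] (by omega)]
  rcases hne : mySplit l with _ | ⟨s, r⟩
  · exact absurd hne (mySplit_ne_nil l)
  · simp [consHead]

-- A's fold equals gA
lemma foldA_eq (l : List Char) : ∀ (out : List Int) (k : Int), 0 ≤ k →
    (if (l.foldl stepA (out, k)).2 > 0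
      then (l.foldl stepA (out, k)).1 ++ [(l.foldl stepA (out, k)).2]
      else (l.foldl stepA (out, k)).1) = out ++ gA k l := by
  induction l with
  | nil => intro out k _; simp only [List.foldl_nil, gA]; split <;> simp
  | cons c t ih =>
    intro out k hk0
    rw [List.foldl_cons]
    by_cases hc : c = '.'
    · subst hc
      by_cases hk : k > 0
      · rw [show stepA (out, k) '.' = (out ++ [k], 0) by simp [stepA, hk]]
        rw [ih (out ++ [k]) 0 le_rfl]
        simp [gA, hk]
      · have hz : k = 0 := by omega
        subst hz
        rw [show stepA (out, (0 : Int)) '.' = (out, 0) by simp [stepA]]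
        rw [ih out 0 le_rfl]
        simp [gA]
    · by_cases hh : c = '#'
      · subst hh
        rw [show stepA (out, k) '#' = (out, k + 1) by simp [stepA]]
        rw [ih out (k + 1) (by omega)]
        simp [gA]
      · rw [show stepA (out, k) c = (out, k) by simp [stepA, hc, hh]]
        rw [ih out k hk0]
        simp [gA, hc, hh]

-- gA versus filtered '#'-counts of mySplit
lemma gA_eq (l : List Char) : ∀ (k : Int), 0 ≤ k →
    gA k l =
      (if k + ((mySplit l).headI.count '#' : Int) > 0
        then [k + ((mySplit l).headI.count '#' : Int)] else [])
      ++ (((mySplit l).tail.filter (fun seg => seg.count '#' > 0)).map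
          (fun seg => (seg.count '#' : Int))) := by
  induction l with
  | nil => intro k hk; simp [gA, mySplit]
  | cons c t ih =>
    intro k hk
    rcases hne : mySplit t with _ | ⟨s, r⟩
    · exact absurd hne (mySplit_ne_nil t)
    · by_cases hc : c = '.'
      · subst hc
        rw [show gA k ('.' :: t) = (if k > 0 then [k] else []) ++ gA 0 t by simp [gA]]
        rw [ih 0 le_rfl, hne]
        by_cases hs : s.count '#' > 0
        · have hm : '#' ∈ s := List.count_pos_iff.mp hs
          simp [mySplit, hne, hs, hm]
        · simp at hs
          simp [mySplit, hne, hs]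
      · by_cases hh : c = '#'
        · subst hh
          rw [show gA k ('#' :: t) = gA (k + 1) t by simp [gA]]
          rw [ih (k + 1) (by omega), hne]
          have hcnt : (('#' :: s).count '#') = s.count '#' + 1 := by simp
          simp only [mySplit, hne, List.headI_cons, List.tail_cons, if_neg (by decide : ¬('#' = '.')), hcnt]
          have heq : k + ((s.count '#' + 1 : ℕ) : ℤ) = k + 1 + (s.count '#' : ℤ) := by
            push_cast; ring
          rw [heq]
        · rw [show gA k (c :: t) = gA k t by simp [gA, hc, hh]]
          rw [ih k hk, hne]
          have hcnt : ((c :: s).count '#') = s.count '#' := by simp [hh]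
          simp [mySplit, hne, hc, hcnt]

lemma headI_filter_cons (sl : List (List Char)) (hne : sl ≠ []) :
    (if (0 : Int) + (sl.headI.count '#' : Int) > 0
      then [(0 : Int) + (sl.headI.count '#' : Int)] else [])
    ++ ((sl.tail.filter (fun seg => seg.count '#' > 0)).map (fun seg => (seg.count '#' : Int)))
    = (sl.filter (fun seg => seg.count '#' > 0)).map (fun seg => (seg.count '#' : Int)) := by
  rcases sl with _ | ⟨s, r⟩
  · exact absurd rfl hne
  · by_cases hs : s.count '#' > 0
    · have hm : '#' ∈ s := List.count_pos_iff.mp hs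
      simp [hs, hm]
    · simp at hs
      simp [hs]

lemma strCount_ofList (seg : List Char) :
    PySem.Str.count (String.ofList seg) "#" = seg.count '#' := by
  rw [PySem.Str.count_eq]
  have h1 : (String.ofList seg).toList = seg := by simp
  have h2 : ("#" : String).toList = ['#'] := by decide
  rw [h1, h2, chars_count_single]

lemma split?_dot (s : String) :
    PySem.Str.split? s "." = some ((PySem.Chars.splitOn s.toList ['.']).map String.ofList) := by
  simp [PySem.Str.split?, PySem.Chars.split?]

-- ===== VERDICT (by name: the statement is the Claim_ definition above) =====
theorem detect_groups_spec : Claim_equal_detect_groups := by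
  intro springs _
  show detect_groups springs = detect_groups_alt springs
  rw [detect_groups_alt, split?_dot, splitOn_eq_mySplit]
  rw [show detect_groups springs
        = (if (springs.toList.foldl stepA ([], 0)).2 > 0
            then (springs.toList.foldl stepA ([], 0)).1 ++ [(springs.toList.foldl stepA ([], 0)).2]
            else (springs.toList.foldl stepA ([], 0)).1) from rfl]
  rw [foldA_eq springs.toList [] 0 le_rfl, gA_eq springs.toList 0 le_rfl,
      headI_filter_cons _ (mySplit_ne_nil _)]
  simp only [List.nil_append, List.filter_map, List.map_map, Function.comp_def, strCount_ofList]
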